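-- pv_equiv track=rewrite | github.com/wacky-hive/MindfulRank | backend/services/content_processor.py | _should_skip_url
-- ===== SOURCE A (Python) =====
-- def _should_skip_url(url: str) -> bool:
--     """
--     Determine if a URL should be skipped during crawling.
--     """
--     url_lower = url.lower()
--
--     # Skip common non-content pages
--     skip_patterns = [
--         '/privacy', '/terms', '/legal', '/policy', '/cookies',
--         '/login', '/register', '/signup', '/signin', '/logout',
--         '/admin', '/wp-admin', '/dashboard',
--         '/cart', '/checkout', '/account', '/profile',
--         '/search', '/contact', '/sitemap.xml', '/robots.txt',
--         '.pdf', '.jpg', '.png', '.gif', '.svg', '.css', '.js',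
--         '/#', 'javascript:', 'mailto:', 'tel:',
--         '/tag/', '/category/', '/author/', '/date/'
--     ]
--
--     for pattern in skip_patterns:
--         if pattern in url_lower:
--             return True
--
--     return False
-- ===== SOURCE B (Python) =====
-- # First-character dispatch: patterns bucketed by their first character, so at
-- # each position of the lowercased URL only the (usually empty) bucket for that
-- # character is tried.
-- _BUCKETS = {
--     '/': ['/privacy', '/terms', '/legal', '/policy', '/cookies',
--           '/login', '/register', '/signup', '/signin', '/logout',
--           '/admin', '/wp-admin', '/dashboard',
--           '/cart', '/checkout', '/account', '/profile',
--           '/search', '/contact', '/sitemap.xml', '/robots.txt',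
--           '/#', '/tag/', '/category/', '/author/', '/date/'],
--     '.': ['.pdf', '.jpg', '.png', '.gif', '.svg', '.css', '.js'],
--     'j': ['javascript:'],
--     'm': ['mailto:'],
--     't': ['tel:'],
-- }
-- _EMPTY = ()
--
--
-- def _should_skip_url(url: str) -> bool:
--     u = url.lower()
--     for i, ch in enumerate(u):
--         for p in _BUCKETS.get(ch, _EMPTY):
--             if u.startswith(p, i):
--                 return True
--     return False
-- ===== Notes on version B (the rewrite author's own statement) =====
-- stated objective: alternative
-- what changed: A loops over the flat pattern list running a full substring-containment scan of the URL per pattern; B walks the lowercased URL once and, at each position, dispatches on the current character into a dict of patterns bucketed by first character, testing only that bucket with an offset startswith.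
import Mathlib
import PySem

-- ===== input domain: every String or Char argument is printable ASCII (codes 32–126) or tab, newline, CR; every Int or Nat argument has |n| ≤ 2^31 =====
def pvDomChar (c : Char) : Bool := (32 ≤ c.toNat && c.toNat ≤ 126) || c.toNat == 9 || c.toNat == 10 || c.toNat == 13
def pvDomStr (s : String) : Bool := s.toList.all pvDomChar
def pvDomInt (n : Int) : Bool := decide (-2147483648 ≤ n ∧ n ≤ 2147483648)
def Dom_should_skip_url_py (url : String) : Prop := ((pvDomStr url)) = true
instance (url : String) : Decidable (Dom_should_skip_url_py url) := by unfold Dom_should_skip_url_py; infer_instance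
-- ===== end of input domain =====

-- B replaces A's pattern-major loop of substring scans by a single walk of the
-- lowercased URL dispatching at each position into a first-character bucket of
-- patterns (objective: alternative traversal/data structure, same results).

-- ===== PORT A =====
-- A: lowercase, then for each pattern in the flat list return True as soon as
-- 'pattern in url_lower'; the for-with-early-return is List.any.
def should_skip_url_py (url : String) : Bool :=
  let url_lower := PySem.Str.lower url
  let skip_patterns : List String :=
    ["/privacy", "/terms", "/legal", "/policy", "/cookies",
     "/login", "/register", "/signup", "/signin", "/logout",
     "/admin", "/wp-admin", "/dashboard",
     "/cart", "/checkout", "/account", "/profile",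
     "/search", "/contact", "/sitemap.xml", "/robots.txt",
     ".pdf", ".jpg", ".png", ".gif", ".svg", ".css", ".js",
     "/#", "javascript:", "mailto:", "tel:",
     "/tag/", "/category/", "/author/", "/date/"]
  skip_patterns.any (fun pattern => PySem.Str.isIn pattern url_lower)

-- ===== PORT B =====
-- Source B's module-level dict of patterns bucketed by first character; ported as
-- the lookup function it is used as: _BUCKETS.get(ch, _EMPTY).
def pvBucket (ch : Char) : List String :=
  if ch = '/' then
    ["/privacy", "/terms", "/legal", "/policy", "/cookies",
     "/login", "/register", "/signup", "/signin", "/logout",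
     "/admin", "/wp-admin", "/dashboard",
     "/cart", "/checkout", "/account", "/profile",
     "/search", "/contact", "/sitemap.xml", "/robots.txt",
     "/#", "/tag/", "/category/", "/author/", "/date/"]
  else if ch = '.' then
    [".pdf", ".jpg", ".png", ".gif", ".svg", ".css", ".js"]
  else if ch = 'j' then ["javascript:"]
  else if ch = 'm' then ["mailto:"]
  else if ch = 't' then ["tel:"]
  else []

-- Source B's 'for i, ch in enumerate(u): for p in _BUCKETS.get(ch, _EMPTY): if
-- u.startswith(p, i)': since i always points at ch, u.startswith(p, i) is
-- 'p is a prefix of the suffix of u starting at ch' — the enumerate loop is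
-- the structural recursion over that suffix.
def pvScan : List Char → Bool
  | [] => false
  | ch :: rest =>
      (pvBucket ch).any (fun p => PySem.Chars.startswith (ch :: rest) p.toList)
        || pvScan rest

def should_skip_url_py_alt (url : String) : Bool :=
  pvScan (PySem.Str.lower url).toList

-- ===== PRECONDITION & SPEC =====
def Spec_should_skip_url_py (url : String) (out : Bool) : Prop := out = should_skip_url_py_alt url
instance (url : String) (out : Bool) : Decidable (Spec_should_skip_url_py url out) := by unfold Spec_should_skip_url_py; infer_instance

-- ===== CLAIM (what is proved, stated in full; the proofs are below) =====
def Claim_equal_should_skip_url_py : Prop := ∀ (url : String), Dom_should_skip_url_py url → Spec_should_skip_url_py url (should_skip_url_py url)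

-- ===== LEMMAS AND PROOFS =====

-- A's flat pattern list, for the proofs only.
def pvAllPatterns : List String :=
  ["/privacy", "/terms", "/legal", "/policy", "/cookies",
   "/login", "/register", "/signup", "/signin", "/logout",
   "/admin", "/wp-admin", "/dashboard",
   "/cart", "/checkout", "/account", "/profile",
   "/search", "/contact", "/sitemap.xml", "/robots.txt",
   ".pdf", ".jpg", ".png", ".gif", ".svg", ".css", ".js",
   "/#", "javascript:", "mailto:", "tel:",
   "/tag/", "/category/", "/author/", "/date/"]

-- 'sub in c::rest' splits into 'match at the front' or 'sub in rest'.
theorem pv_isIn_cons (p : List Char) (c : Char) (rest : List Char) :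
    PySem.Chars.isIn p (c :: rest)
      = (PySem.Chars.startswith (c :: rest) p || PySem.Chars.isIn p rest) := by
  rw [Bool.eq_iff_iff]
  simp only [Bool.or_eq_true, PySem.Chars.isIn_iff_infix, PySem.Chars.startswith_iff]
  exact List.infix_cons_iff

-- If c differs from the pattern's first character, the pattern cannot start there.
theorem pv_sw_mismatch (c d : Char) (rest tl : List Char) (hne : (c == d) = false) :
    PySem.Chars.startswith (c :: rest) (d :: tl) = false := by
  rw [Bool.eq_false_iff]
  intro h
  rw [PySem.Chars.startswith_iff, List.cons_prefix_cons] at h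
  simp [h.1] at hne

-- The bucket for c contains exactly the patterns of the flat list that can
-- start at a position holding c (the others have a different first character).
theorem pv_bucket_complete (c : Char) (rest : List Char) :
    pvAllPatterns.any (fun p => PySem.Chars.startswith (c :: rest) p.toList)
      = (pvBucket c).any (fun p => PySem.Chars.startswith (c :: rest) p.toList) := by
  by_cases h1 : c = '/'
  · rw [h1]; simp [pvAllPatterns, pvBucket, pv_sw_mismatch]
  by_cases h2 : c = '.'
  · rw [h2]; simp [pvAllPatterns, pvBucket, pv_sw_mismatch]
  by_cases h3 : c = 'j'
  · rw [h3]; simp [pvAllPatterns, pvBucket, pv_sw_mismatch]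
  by_cases h4 : c = 'm'
  · rw [h4]; simp [pvAllPatterns, pvBucket, pv_sw_mismatch]
  by_cases h5 : c = 't'
  · rw [h5]; simp [pvAllPatterns, pvBucket, pv_sw_mismatch]
  simp [pvAllPatterns, pvBucket, h1, h2, h3, h4, h5, pv_sw_mismatch]

theorem pv_any_orAux {α : Type} (l : List α) (f g : α → Bool) :
    l.any (fun x => f x || g x) = (l.any f || l.any g) := by
  induction l with
  | nil => simp
  | cons a t ih =>
      simp [List.any_cons, ih, Bool.or_assoc, Bool.or_left_comm]

-- The position-major bucketed scan equals A's pattern-major containment test.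
theorem pv_scan_eq (L : List Char) :
    pvScan L = pvAllPatterns.any (fun p => PySem.Chars.isIn p.toList L) := by
  induction L with
  | nil => decide
  | cons c rest ih =>
      simp only [pvScan, ih, ← pv_bucket_complete]
      rw [← pv_any_orAux]
      simp only [pv_isIn_cons]

-- ===== VERDICT (by name: the statement is the Claim_ definition above) =====
theorem should_skip_url_py_spec : Claim_equal_should_skip_url_py := by
  intro url _
  unfold Spec_should_skip_url_py should_skip_url_py should_skip_url_py_alt
  rw [pv_scan_eq]
  simp only [pvAllPatterns, PySem.Str.isIn_eq]
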